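-- pv_equiv track=rewrite | github.com/Lucas-Guimaraes/Reddit-Daily-Programmer | Easy Problems/221-230/222easy.py | balance_word
-- ===== SOURCE A (Python) =====
-- def balance_word(word):
--     #String for index
--     alpha = 'ABCDEFGHIJKLMNOPQRSTUVWXYZ'
--     #loops every letter that is not first or last
--     for i in range(1, len(word)-1):
--         #Extracts the split points
--         first_w = word[:i]
--         second_w = word[i+1:]
--         first_s = 0
--         second_s = 0
--         #Grabs score for the left side
--         for f in range(len(first_w)):
--             first_s += (alpha.find(first_w[f])+1) * (len(first_w) - f)
--         #Grabs score for the right side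
--         for s in range(len(second_w)):
--             second_s += (alpha.find(second_w[s])+1) * (s+1)
--         #If equal, return
--         if first_s == second_s:
--             return first_w + " " + word[i] + " " + second_w + " - " + str(first_s)
--
--     #If not equal
--     return "{} does not balance".format(word)
-- ===== SOURCE B (Python) =====
-- def balance_word(word):
--     alpha = 'ABCDEFGHIJKLMNOPQRSTUVWXYZ'
--     vals = [alpha.find(ch) + 1 for ch in word]
--     n = len(word)
--     if n < 3:
--         return "{} does not balance".format(word)
--     # running state for pivot i: left/right torques and prefix/suffix sums
--     left = vals[0]
--     right = sum(vals[s] * (s - 1) for s in range(2, n))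
--     sl = vals[0] + vals[1]
--     sr = sum(vals[2:])
--     for i in range(1, n - 1):
--         if left == right:
--             return word[:i] + " " + word[i] + " " + word[i+1:] + " - " + str(left)
--         v = vals[i + 1]
--         left, right, sl, sr = left + sl, right - sr, sl + v, sr - v
--     return "{} does not balance".format(word)
-- ===== Notes on version B (the rewrite author's own statement) =====
-- stated objective: alternative
-- what changed: Replaces A's per-pivot rescoring of both sides (two fresh inner loops for every split point) by a single pass that precomputes the letter values once and updates the left/right torques incrementally with running prefix/suffix sums.
import Mathlib
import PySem

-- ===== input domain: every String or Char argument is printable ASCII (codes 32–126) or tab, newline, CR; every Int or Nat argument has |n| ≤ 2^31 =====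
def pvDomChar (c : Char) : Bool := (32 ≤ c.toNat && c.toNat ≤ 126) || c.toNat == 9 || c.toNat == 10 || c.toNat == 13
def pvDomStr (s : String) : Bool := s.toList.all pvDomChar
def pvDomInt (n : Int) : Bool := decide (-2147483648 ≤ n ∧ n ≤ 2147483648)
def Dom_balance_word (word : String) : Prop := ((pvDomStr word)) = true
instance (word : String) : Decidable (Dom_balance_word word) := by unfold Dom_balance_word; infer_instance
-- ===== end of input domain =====

-- B replaces A's per-pivot rescoring (two fresh inner loops per split point) by a single
-- pass that updates the two torques incrementally with running prefix/suffix letter sums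
-- (objective: alternative).

-- ===== PORT A =====
def pvAlpha : List Char := "ABCDEFGHIJKLMNOPQRSTUVWXYZ".toList

-- for f in range(len(first_w)): first_s += (alpha.find(first_w[f])+1) * (len(first_w) - f)
def pvFirstScore (fw : List Char) : Int :=
  (PySem.List.pyRange 0 (fw.length : Int)).foldl
    (fun acc f => acc + (PySem.Chars.find pvAlpha [PySem.List.pyGetD fw f ' '] + 1) * ((fw.length : Int) - f)) 0

-- for s in range(len(second_w)): second_s += (alpha.find(second_w[s])+1) * (s+1)
def pvSecondScore (sw : List Char) : Int :=
  (PySem.List.pyRange 0 (sw.length : Int)).foldl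
    (fun acc s => acc + (PySem.Chars.find pvAlpha [PySem.List.pyGetD sw s ' '] + 1) * (s + 1)) 0

-- the for-loop over i in range(1, len(word)-1) with early return (index always in range,
-- so word[i] is transliterated with pyGetD; the default is never used)
def pvAgo (w : List Char) (is : List Int) : List Char :=
  match is with
  | [] => w ++ " does not balance".toList
  | i :: rest =>
    let fw := PySem.List.slice w none (some i)
    let sw := PySem.List.slice w (some (i + 1)) none
    let fs := pvFirstScore fw
    let ss := pvSecondScore sw
    if fs = ss then
      fw ++ [' '] ++ [PySem.List.pyGetD w i ' '] ++ [' '] ++ sw ++ " - ".toList ++ PySem.Int.toChars fs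
    else pvAgo w rest

def balance_word (word : String) : String :=
  String.ofList (pvAgo word.toList (PySem.List.pyRange 1 ((word.toList.length : Int) - 1)))

-- ===== PORT B =====
def pvVal (c : Char) : Int := PySem.Chars.find pvAlpha [c] + 1

-- B's single pass: state (left, right, sl, sr) updated per pivot
def pvBgo (w : List Char) (vals : List Int) (is : List Int)
    (left right sl sr : Int) : List Char :=
  match is with
  | [] => w ++ " does not balance".toList
  | i :: rest =>
    if left = right then
      PySem.List.slice w none (some i) ++ [' '] ++ [PySem.List.pyGetD w i ' '] ++ [' ']
        ++ PySem.List.slice w (some (i + 1)) none ++ " - ".toList ++ PySem.Int.toChars left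
    else
      let v := PySem.List.pyGetD vals (i + 1) 0
      pvBgo w vals rest (left + sl) (right - sr) (sl + v) (sr - v)

def balance_word_alt (word : String) : String :=
  let w := word.toList
  let vals := w.map pvVal
  let n : Int := (w.length : Int)
  if n < 3 then String.ofList (w ++ " does not balance".toList)
  else
    let left := PySem.List.pyGetD vals 0 0
    let right := (PySem.List.pyRange 2 n).foldl
      (fun acc s => acc + PySem.List.pyGetD vals s 0 * (s - 1)) 0
    let sl := PySem.List.pyGetD vals 0 0 + PySem.List.pyGetD vals 1 0
    let sr := (PySem.List.slice vals (some 2) none).sum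
    String.ofList (pvBgo w vals (PySem.List.pyRange 1 (n - 1)) left right sl sr)

-- ===== PRECONDITION & SPEC =====
def Spec_balance_word (word : String) (out : String) : Prop := out = balance_word_alt word
instance (word : String) (out : String) : Decidable (Spec_balance_word word out) := by unfold Spec_balance_word; infer_instance

-- ===== CLAIM (what is proved, stated in full; the proofs are below) =====
def Claim_equal_balance_word : Prop := ∀ (word : String), Dom_balance_word word → Spec_balance_word word (balance_word word)

-- ===== LEMMAS AND PROOFS =====

-- closed forms for the two torques at pivot i
def pvF (vals : List Int) (i : Nat) : Int :=
  ∑ f ∈ Finset.range i, vals.getD f 0 * ((i : Int) - (f : Int))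
def pvG (vals : List Int) (i : Nat) : Int :=
  ∑ s ∈ Finset.Ico (i + 1) vals.length, vals.getD s 0 * ((s : Int) - (i : Int))

theorem pv_takeSum (vals : List Int) (j : Nat) :
    (vals.take j).sum = ∑ f ∈ Finset.range j, vals.getD f 0 := by
  induction j with
  | zero => simp
  | succ j ih =>
    rw [Finset.sum_range_succ, ← ih]
    by_cases h : j < vals.length
    · rw [List.take_add_one, List.getElem?_eq_getElem h, Option.toList_some,
        List.sum_append, List.sum_cons, List.sum_nil, add_zero,
        List.getD_eq_getElem _ _ h]
    · rw [List.take_of_length_le (by omega), List.take_of_length_le (by omega),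
        List.getD_eq_default _ _ (by omega), add_zero]

theorem pv_dropSum (vals : List Int) (j : Nat) (hj : j ≤ vals.length) :
    (vals.drop j).sum = ∑ s ∈ Finset.Ico j vals.length, vals.getD s 0 := by
  have h1 : vals = vals.take j ++ vals.drop j := (List.take_append_drop j vals).symm
  have h2 : vals.sum = (vals.take j).sum + (vals.drop j).sum := by
    conv_lhs => rw [h1]
    exact List.sum_append
  have h3 : vals.sum = ∑ f ∈ Finset.range vals.length, vals.getD f 0 := by
    rw [← pv_takeSum vals vals.length, List.take_length]
  have h4 := Finset.sum_range_add_sum_Ico (fun s => vals.getD s 0) hj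
  rw [pv_takeSum] at h2
  linarith [h2, h3, h4]

theorem pv_foldl_sum (k : Nat) (h : Int → Int) :
    (PySem.List.pyRange 0 (k : Int)).foldl (fun acc f => acc + h f) 0
      = ∑ f ∈ Finset.range k, h (f : Int) := by
  rw [PySem.List.pyRange_zero_nat, List.foldl_map, PySem.List.foldl_add]
  simp only [zero_add]
  rfl

-- A's left inner loop computes pvF
theorem pv_firstScore_eq (w : List Char) (i : Nat) (hi : i ≤ w.length) :
    pvFirstScore (w.take i) = pvF (w.map pvVal) i := by
  unfold pvFirstScore pvF
  have hl : (w.take i).length = i := by simp [List.length_take, Nat.min_eq_left hi]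
  rw [hl, pv_foldl_sum i
    (fun f => (PySem.Chars.find pvAlpha [PySem.List.pyGetD (w.take i) f ' '] + 1) * ((i : Int) - f))]
  refine Finset.sum_congr rfl (fun f hf => ?_)
  have hfi : f < i := Finset.mem_range.mp hf
  have hfw : f < w.length := lt_of_lt_of_le hfi hi
  rw [PySem.List.pyGetD_natCast]
  have : (w.take i).getD f ' ' = w[f] := by
    rw [List.getD_eq_getElem _ _ (by omega : f < (w.take i).length)]
    simp [List.getElem_take]
  rw [this, List.getD_eq_getElem _ _ (by simpa using hfw)]
  simp [pvVal]

-- A's right inner loop computes pvG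
theorem pv_secondScore_eq (w : List Char) (i : Nat) (hi : i + 1 ≤ w.length) :
    pvSecondScore (w.drop (i + 1)) = pvG (w.map pvVal) i := by
  unfold pvSecondScore pvG
  have hn : (w.map pvVal).length = w.length := by simp
  rw [hn, Finset.sum_Ico_eq_sum_range]
  have hl : (w.drop (i + 1)).length = w.length - (i + 1) := by simp
  rw [hl, pv_foldl_sum (w.length - (i + 1))
    (fun s => (PySem.Chars.find pvAlpha [PySem.List.pyGetD (w.drop (i + 1)) s ' '] + 1) * (s + 1))]
  refine Finset.sum_congr rfl (fun k hk => ?_)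
  have hki : k < w.length - (i + 1) := Finset.mem_range.mp hk
  have hkw : i + 1 + k < w.length := by omega
  rw [PySem.List.pyGetD_natCast]
  have h1 : (w.drop (i + 1)).getD k ' ' = w[i + 1 + k] := by
    rw [List.getD_eq_getElem _ _ (by omega : k < (w.drop (i + 1)).length)]
    simp [List.getElem_drop]
  have h2 : (w.map pvVal).getD (i + 1 + k) 0 = pvVal w[i + 1 + k] := by
    rw [List.getD_eq_getElem _ _ (by simpa using hkw)]
    simp
  rw [h1, h2]
  unfold pvVal
  push_cast
  ring

-- torque and running-sum update steps
theorem pv_F_step (vals : List Int) (i : Nat) :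
    pvF vals (i + 1) = pvF vals i + (vals.take (i + 1)).sum := by
  unfold pvF
  rw [pv_takeSum, Finset.sum_range_succ, Finset.sum_range_succ]
  have hsplit : ∑ x ∈ Finset.range i, vals.getD x 0 * (((i + 1 : Nat) : Int) - (x : Int))
      = ∑ x ∈ Finset.range i, (vals.getD x 0 * ((i : Int) - (x : Int)) + vals.getD x 0) :=
    Finset.sum_congr rfl (fun x _ => by push_cast; ring)
  rw [hsplit, Finset.sum_add_distrib]
  push_cast
  ring

theorem pv_G_step (vals : List Int) (i : Nat) (hi : i + 1 < vals.length) :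
    pvG vals (i + 1) = pvG vals i - (vals.drop (i + 1)).sum := by
  symm
  unfold pvG
  rw [pv_dropSum vals (i + 1) (by omega), ← Finset.sum_sub_distrib]
  have hsplit : ∑ s ∈ Finset.Ico (i + 1) vals.length,
        (vals.getD s 0 * ((s : Int) - (i : Int)) - vals.getD s 0)
      = ∑ s ∈ Finset.Ico (i + 1) vals.length, vals.getD s 0 * ((s : Int) - ((i + 1 : Nat) : Int)) :=
    Finset.sum_congr rfl (fun s _ => by push_cast; ring)
  rw [hsplit, Finset.sum_eq_sum_Ico_succ_bot hi]
  push_cast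
  ring

-- main loop equivalence, by downward induction over the remaining pivots
theorem pv_loop_eq (w : List Char) (i : Nat) (h1 : 1 ≤ i) (h2 : i ≤ w.length - 1)
    (h3 : 3 ≤ w.length) :
    pvAgo w (PySem.List.pyRange (i : Int) ((w.length : Int) - 1)) =
    pvBgo w (w.map pvVal) (PySem.List.pyRange (i : Int) ((w.length : Int) - 1))
      (pvF (w.map pvVal) i) (pvG (w.map pvVal) i)
      (((w.map pvVal).take (i + 1)).sum) (((w.map pvVal).drop (i + 1)).sum) := by
  have hlen : (w.map pvVal).length = w.length := by simp
  by_cases hend : i = w.length - 1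
  · rw [PySem.List.pyRange_one_eq_nil (by omega)]
    rfl
  · have hcons : ((i : Int)) < (w.length : Int) - 1 := by omega
    rw [PySem.List.pyRange_one_cons hcons]
    unfold pvAgo pvBgo
    simp only
    have hfs : pvFirstScore (PySem.List.slice w none (some (i : Int))) = pvF (w.map pvVal) i := by
      rw [PySem.List.slice_to_natCast]
      exact pv_firstScore_eq w i (by omega)
    have hdrop : PySem.List.slice w (some ((i : Int) + 1)) none = w.drop (i + 1) := by
      have : ((i : Int) + 1) = ((i + 1 : Nat) : Int) := by push_cast; ring
      rw [this, PySem.List.slice_from_natCast]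
    have hss : pvSecondScore (PySem.List.slice w (some ((i : Int) + 1)) none) = pvG (w.map pvVal) i := by
      rw [hdrop]
      exact pv_secondScore_eq w i (by omega)
    rw [hfs, hss]
    by_cases heq : pvF (w.map pvVal) i = pvG (w.map pvVal) i
    · simp [heq]
    · simp only [if_neg heq]
      have hnext : ((i : Int) + 1) = ((i + 1 : Nat) : Int) := by push_cast; ring
      rw [hnext]
      have ih := pv_loop_eq w (i + 1) (by omega) (by omega) h3
      rw [ih]
      have hv : PySem.List.pyGetD (w.map pvVal) ((i + 1 : Nat) : Int) 0
          = (w.map pvVal).getD (i + 1) 0 := PySem.List.pyGetD_natCast _ _ _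
      rw [hv]
      congr 1
      · exact pv_F_step (w.map pvVal) i
      · exact pv_G_step (w.map pvVal) i (by omega)
      · rw [pv_takeSum, pv_takeSum, Finset.sum_range_succ]
      · have hi2 : i + 1 < (w.map pvVal).length := by omega
        rw [List.drop_eq_getElem_cons hi2, List.sum_cons,
          List.getD_eq_getElem _ _ hi2]
        ring
termination_by w.length - 1 - i

-- B's initial 'right' fold computes pvG at pivot 1
theorem pv_right_init (vals : List Int) (h : 3 ≤ vals.length) :
    (PySem.List.pyRange 2 (vals.length : Int)).foldl
      (fun acc s => acc + PySem.List.pyGetD vals s 0 * (s - 1)) 0 = pvG vals 1 := by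
  have key : (PySem.List.pyRange 2 (vals.length : Int)).foldl
      (fun acc s => acc + PySem.List.pyGetD vals s 0 * (s - 1)) 0
      = ∑ k ∈ Finset.range (vals.length - 2),
          PySem.List.pyGetD vals (2 + (k : Int)) 0 * (2 + (k : Int) - 1) := by
    rw [PySem.List.pyRange_one, List.foldl_map, PySem.List.foldl_add]
    simp only [zero_add]
    have hl : ((vals.length : Int) - 2).toNat = vals.length - 2 := by omega
    rw [hl]
    rfl
  rw [key]
  unfold pvG
  rw [Finset.sum_Ico_eq_sum_range]
  refine Finset.sum_congr (by norm_num) (fun k _ => ?_)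
  have hc : ((2 : Int) + (k : Int)) = ((1 + 1 + k : Nat) : Int) := by push_cast; ring
  rw [hc, PySem.List.pyGetD_natCast]
  push_cast
  ring

-- ===== VERDICT (by name: the statement is the Claim_ definition above) =====
theorem balance_word_spec : Claim_equal_balance_word := by
  intro word _
  unfold Spec_balance_word balance_word balance_word_alt
  set w := word.toList with hw
  by_cases h3 : 3 ≤ w.length
  · have hnlt : ¬ ((w.length : Int) < 3) := by omega
    simp only [if_neg hnlt]
    congr 1
    have h1 : pvF (w.map pvVal) 1 = PySem.List.pyGetD (w.map pvVal) 0 0 := by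
      unfold pvF
      rw [Finset.sum_range_succ]
      have h0 : (0 : Int) = ((0 : Nat) : Int) := rfl
      rw [h0, PySem.List.pyGetD_natCast]
      simp
    have hsl : ((w.map pvVal).take 2).sum
        = PySem.List.pyGetD (w.map pvVal) 0 0 + PySem.List.pyGetD (w.map pvVal) 1 0 := by
      rw [pv_takeSum, Finset.sum_range_succ, Finset.sum_range_succ]
      have h0 : (0 : Int) = ((0 : Nat) : Int) := rfl
      have h1' : (1 : Int) = ((1 : Nat) : Int) := rfl
      rw [h0, h1', PySem.List.pyGetD_natCast, PySem.List.pyGetD_natCast]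
      simp
    have hsr : (PySem.List.slice (w.map pvVal) (some 2) none) = (w.map pvVal).drop 2 := by
      have h2 : (2 : Int) = ((2 : Nat) : Int) := rfl
      rw [h2, PySem.List.slice_from_natCast]
    have hg : (PySem.List.pyRange 2 ((w.length : Int))).foldl
        (fun acc s => acc + PySem.List.pyGetD (w.map pvVal) s 0 * (s - 1)) 0 = pvG (w.map pvVal) 1 := by
      have hlen : (w.map pvVal).length = w.length := by simp
      rw [← hlen]
      exact pv_right_init (w.map pvVal) (by omega)
    have hmain := pv_loop_eq w 1 (le_refl 1) (by omega) h3
    simp only [Nat.cast_one] at hmain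
    rw [hmain, h1, hsl, hsr, hg]
  · have hnlt : ((w.length : Int) < 3) := by omega
    simp only [if_pos hnlt]
    congr 1
    rw [PySem.List.pyRange_one_eq_nil (by omega)]
    rfl
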